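-- pv_equiv track=rewrite | github.com/ayush-prajapati01/Python-Data-Structure | ListPrograms/10_Remove_Specific_Elements.py | remove_specified_element
-- ===== SOURCE A (Python) =====
-- def remove_specified_element(word_list):
--     """
--     Description:
--         This function returns list after removing the 0th, 4th and
--         5th elements.
--     Parameters:
--         word_list: The list containing words.
--     Return:
--         list: updated word list
--     """
--     updated_word_list = []
--
--     for index in range(len(word_list)):
--         if(index == 0):
--             pass
--         elif(index == 4):
--             pass
--         elif(index == 5):
--             pass
--         else:
--             updated_word_list.append(word_list[index])
--
--     return updated_word_list
-- ===== SOURCE B (Python) =====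
-- def remove_specified_element(word_list):
--     """
--     Description:
--         Return the list without the elements at indices 0, 4 and 5,
--         built from two contiguous slices (indices 1..3 and 6..end).
--     Parameters:
--         word_list: The list containing words.
--     Return:
--         list: updated word list
--     """
--     return word_list[1:4] + word_list[6:]
-- ===== Notes on version B (the rewrite author's own statement) =====
-- stated objective: simpler
-- what changed: Replaces the index loop with per-index skip branches by a closed-form concatenation of two slices, word_list[1:4] + word_list[6:], which keeps exactly the indices the loop keeps.
import Mathlib
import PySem

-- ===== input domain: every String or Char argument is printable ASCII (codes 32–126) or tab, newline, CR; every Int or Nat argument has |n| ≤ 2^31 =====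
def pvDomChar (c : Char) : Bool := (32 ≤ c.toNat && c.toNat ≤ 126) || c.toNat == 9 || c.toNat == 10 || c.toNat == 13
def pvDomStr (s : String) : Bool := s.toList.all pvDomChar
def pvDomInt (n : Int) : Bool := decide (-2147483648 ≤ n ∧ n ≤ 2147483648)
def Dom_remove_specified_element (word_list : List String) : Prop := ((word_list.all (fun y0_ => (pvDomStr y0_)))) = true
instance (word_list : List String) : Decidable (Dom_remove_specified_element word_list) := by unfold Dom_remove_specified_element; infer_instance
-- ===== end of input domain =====

-- B replaces A's index loop (skipping indices 0, 4, 5 branch by branch) with the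
-- concatenation of two slices word_list[1:4] + word_list[6:]; objective: simpler.


-- ===== PORT A =====
-- literal port of A's loop: for index in range(len(word_list)) with the four branches;
-- word_list[index] is in range for every visited index, so pyGetD is exact here.
def remove_specified_element (word_list : List String) : List String :=
  (PySem.List.pyRange 0 word_list.length 1).foldl
    (fun updated_word_list index =>
      if index = 0 then updated_word_list
      else if index = 4 then updated_word_list
      else if index = 5 then updated_word_list
      else updated_word_list ++ [PySem.List.pyGetD word_list index ""]) []

-- ===== PORT B =====
def remove_specified_element_alt (word_list : List String) : List String :=
  PySem.List.slice word_list (some 1) (some 4) ++ PySem.List.slice word_list (some 6) none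

-- ===== PRECONDITION & SPEC =====
def Spec_remove_specified_element (word_list : List String) (out : List String) : Prop := out = remove_specified_element_alt word_list
instance (word_list : List String) (out : List String) : Decidable (Spec_remove_specified_element word_list out) := by unfold Spec_remove_specified_element; infer_instance

-- ===== CLAIM (what is proved, stated in full; the proofs are below) =====
def Claim_equal_remove_specified_element : Prop := ∀ (word_list : List String), Dom_remove_specified_element word_list → Spec_remove_specified_element word_list (remove_specified_element word_list)

-- ===== LEMMAS AND PROOFS =====

-- B in drop/take form
theorem alt_eq (xs : List String) :
    remove_specified_element_alt xs = (xs.drop 1).take 3 ++ xs.drop 6 := by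
  unfold remove_specified_element_alt
  rw [PySem.List.slice_toNat xs (by norm_num) (by norm_num),
      PySem.List.slice_from xs (by norm_num)]
  rfl

-- A equals the drop/take form, by reverse induction on the list
theorem a_eq (xs : List String) :
    remove_specified_element xs = (xs.drop 1).take 3 ++ xs.drop 6 := by
  induction xs using List.reverseRecOn with
  | nil => rfl
  | append_singleton xs x ih =>
    unfold remove_specified_element
    rw [List.length_append, List.length_singleton]
    push_cast
    rw [PySem.List.pyRange_one_succ_right (Int.natCast_nonneg _)]
    rw [List.foldl_append]
    simp only [List.foldl_cons, List.foldl_nil]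
    rw [PySem.List.foldl_congr_mem (PySem.List.pyRange 0 (xs.length : Int)) _
      (fun updated_word_list index =>
        if index = 0 then updated_word_list
        else if index = 4 then updated_word_list
        else if index = 5 then updated_word_list
        else updated_word_list ++ [PySem.List.pyGetD xs index ""]) []
      (by
        intro acc i hi
        have h := PySem.List.mem_pyRange_one.mp hi
        obtain ⟨k, rfl⟩ : ∃ k : ℕ, i = (k : ℤ) := ⟨i.toNat, (Int.toNat_of_nonneg h.1).symm⟩
        have hk : k < xs.length := by exact_mod_cast h.2
        beta_reduce
        split_ifs <;> try rfl
        simp [List.getD, List.getElem?_append_left hk])]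
    show (if (xs.length : Int) = 0 then remove_specified_element xs
      else if (xs.length : Int) = 4 then remove_specified_element xs
      else if (xs.length : Int) = 5 then remove_specified_element xs
      else remove_specified_element xs ++ [PySem.List.pyGetD (xs ++ [x]) xs.length ""]) = _
    rw [ih]
    have hget : PySem.List.pyGetD (xs ++ [x]) (xs.length : Int) "" = x := by
      rw [PySem.List.pyGetD_natCast]
      simp [List.getD]
    rcases Nat.lt_or_ge xs.length 1 with h | h
    · -- length 0: the new element sits at index 0 and is dropped by both
      have hnil : xs = [] := List.eq_nil_of_length_eq_zero (by omega)
      subst hnil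
      simp
    · rcases Nat.lt_or_ge xs.length 4 with h4 | h4
      · -- length 1..3: the new element lands inside the take-3 slice
        rw [if_neg (by omega), if_neg (by omega), if_neg (by omega), hget,
            List.drop_append_of_le_length (by omega),
            List.drop_of_length_le (show xs.length ≤ 6 by omega),
            List.drop_of_length_le (show (xs ++ [x]).length ≤ 6 by simp; omega),
            List.take_of_length_le (show (xs.drop 1).length ≤ 3 by simp; omega),
            List.take_of_length_le (show (xs.drop 1 ++ [x]).length ≤ 3 by simp; omega)]
        simp
      · rcases Nat.lt_or_ge xs.length 6 with h6 | h6
        · -- length 4 or 5: the new element is skipped by both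
          have hA : (if (xs.length : Int) = 0 then (xs.drop 1).take 3 ++ xs.drop 6
              else if (xs.length : Int) = 4 then (xs.drop 1).take 3 ++ xs.drop 6
              else if (xs.length : Int) = 5 then (xs.drop 1).take 3 ++ xs.drop 6
              else (xs.drop 1).take 3 ++ xs.drop 6 ++ [PySem.List.pyGetD (xs ++ [x]) xs.length ""])
              = (xs.drop 1).take 3 ++ xs.drop 6 := by
            split_ifs <;> first | rfl | omega
          rw [hA,
              List.drop_append_of_le_length (show 1 ≤ xs.length by omega),
              List.take_append_of_le_length (show 3 ≤ (xs.drop 1).length by simp; omega),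
              List.drop_of_length_le (show xs.length ≤ 6 by omega),
              List.drop_of_length_le (show (xs ++ [x]).length ≤ 6 by simp; omega)]
        · -- length ≥ 6: the new element lands in the drop-6 tail
          rw [if_neg (by omega), if_neg (by omega), if_neg (by omega), hget,
              List.drop_append_of_le_length (show 1 ≤ xs.length by omega),
              List.take_append_of_le_length (show 3 ≤ (xs.drop 1).length by simp; omega),
              List.drop_append_of_le_length (show 6 ≤ xs.length by omega),
              List.append_assoc]

-- ===== VERDICT (by name: the statement is the Claim_ definition above) =====
theorem remove_specified_element_spec : Claim_equal_remove_specified_element := by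
  intro xs _
  unfold Spec_remove_specified_element
  rw [a_eq, alt_eq]
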